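-- pv_equiv track=rewrite | github.com/jjrreett/tictactoe | main.py | compute_bit_shifts
-- ===== SOURCE A (Python) =====
-- def compute_bit_shifts(pattern_dims: tuple, target_dims: tuple) -> list:
--     """
--     Compute the bit shifts for a given pattern and target dimensions.
--     Args:
--         pattern_dims (tuple): The dimensions of the pattern (height, width).
--         target_dims (tuple): The dimensions of the target (height, width).
--     Returns:
--         list: A list of bit shifts.
--     Example:
--         pattern_dims = (2, 2)
--         target_dims = (4, 4)
--         compute_bit_shifts(pattern_dims, target_dims)
--         # Output: [0, 1, 4, 5, 8, 9, 12, 13]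
--     """
--
--     pattern_height, pattern_width = pattern_dims
--     target_height, target_width = target_dims
--
--     bit_shifts = []
--
--     for i in range(target_height - pattern_height + 1):
--         for j in range(target_width - pattern_width + 1):
--             shift = i * target_width + j
--             bit_shifts.append(shift)
--
--     return bit_shifts
-- ===== SOURCE B (Python) =====
-- def compute_bit_shifts(pattern_dims: tuple, target_dims: tuple) -> list:
--     pattern_height, pattern_width = pattern_dims
--     target_height, target_width = target_dims
--     nh = max(0, target_height - pattern_height + 1)
--     nw = max(0, target_width - pattern_width + 1)
--     return [(k // nw) * target_width + (k % nw) for k in range(nh * nw)]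
-- ===== Notes on version B (the rewrite author's own statement) =====
-- stated objective: alternative
-- what changed: Replaces the nested row/column loops with a single linear-index pass: compute the window counts nh and nw once, then build the list in one comprehension over range(nh*nw) using divmod to recover the row and column.
import Mathlib
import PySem

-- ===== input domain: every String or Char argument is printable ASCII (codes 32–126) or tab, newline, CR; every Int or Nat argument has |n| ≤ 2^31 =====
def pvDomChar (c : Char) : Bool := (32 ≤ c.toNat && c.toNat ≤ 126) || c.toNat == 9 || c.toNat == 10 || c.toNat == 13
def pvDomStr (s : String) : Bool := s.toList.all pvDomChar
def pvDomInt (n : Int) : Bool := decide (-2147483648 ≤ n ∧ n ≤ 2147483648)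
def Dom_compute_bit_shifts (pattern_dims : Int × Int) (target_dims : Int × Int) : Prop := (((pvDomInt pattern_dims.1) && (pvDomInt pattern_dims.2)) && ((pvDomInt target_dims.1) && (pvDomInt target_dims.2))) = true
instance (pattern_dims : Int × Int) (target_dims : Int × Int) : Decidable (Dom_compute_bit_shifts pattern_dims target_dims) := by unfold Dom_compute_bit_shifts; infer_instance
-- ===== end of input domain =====

-- B replaces A's nested row/column loops by one linear-index pass with divmod (alternative decomposition, same cost).

-- ===== PORT A =====
-- nested for-loops appending i * target_width + j
def compute_bit_shifts (pattern_dims : Int × Int) (target_dims : Int × Int) : List Int :=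
  let pattern_height := pattern_dims.1
  let pattern_width := pattern_dims.2
  let target_height := target_dims.1
  let target_width := target_dims.2
  (PySem.List.pyRange 0 (target_height - pattern_height + 1) 1).foldl
    (fun bit_shifts i =>
      (PySem.List.pyRange 0 (target_width - pattern_width + 1) 1).foldl
        (fun bit_shifts j => bit_shifts ++ [i * target_width + j]) bit_shifts)
    []

-- ===== PORT B =====
-- single comprehension over range(nh*nw) with divmod
def compute_bit_shifts_alt (pattern_dims : Int × Int) (target_dims : Int × Int) : List Int :=
  let nh := max 0 (target_dims.1 - pattern_dims.1 + 1)
  let nw := max 0 (target_dims.2 - pattern_dims.2 + 1)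
  (PySem.List.pyRange 0 (nh * nw) 1).map
    (fun k => PySem.Int.floordiv k nw * target_dims.2 + PySem.Int.mod k nw)

-- ===== PRECONDITION & SPEC =====
def Spec_compute_bit_shifts (pattern_dims : Int × Int) (target_dims : Int × Int) (out : List Int) : Prop := out = compute_bit_shifts_alt pattern_dims target_dims
instance (pattern_dims : Int × Int) (target_dims : Int × Int) (out : List Int) : Decidable (Spec_compute_bit_shifts pattern_dims target_dims out) := by unfold Spec_compute_bit_shifts; infer_instance

-- ===== CLAIM (what is proved, stated in full; the proofs are below) =====
def Claim_equal_compute_bit_shifts : Prop := ∀ (pattern_dims : Int × Int) (target_dims : Int × Int), Dom_compute_bit_shifts pattern_dims target_dims → Spec_compute_bit_shifts pattern_dims target_dims (compute_bit_shifts pattern_dims target_dims)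

-- ===== LEMMAS AND PROOFS =====

-- linear index with divmod enumerates the grid row by row
theorem pv_range_mul_divmod (tw : Int) (wN : Nat) : ∀ hN : Nat,
    (List.range (hN * wN)).map
      (fun (k : Nat) => ((k / wN : Nat) : Int) * tw + ((k % wN : Nat) : Int))
    = (List.range hN).flatMap
      (fun (i : Nat) => (List.range wN).map (fun (j : Nat) => ((i : Nat) : Int) * tw + ((j : Nat) : Int))) := by
  intro hN
  induction hN with
  | zero => simp
  | succ n ih =>
    rw [Nat.succ_mul, List.range_add, List.map_append, ih, List.range_succ,
      List.flatMap_append, List.flatMap_singleton, List.map_map]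
    congr 1
    apply List.map_congr_left
    intro j hj
    rw [List.mem_range] at hj
    have hw : 0 < wN := by omega
    have hdiv : (n * wN + j) / wN = n := by
      rw [Nat.mul_comm, Nat.mul_add_div hw, Nat.div_eq_of_lt hj, Nat.add_zero]
    have hmod : (n * wN + j) % wN = j := by
      rw [Nat.mul_comm, Nat.mul_add_mod, Nat.mod_eq_of_lt hj]
    simp [Function.comp, hdiv, hmod]

-- A's nested loops, as a flatMap over natural-number ranges
theorem pv_lhs_eq (H W tw : Int) :
    (PySem.List.pyRange 0 H 1).foldl
      (fun acc i => (PySem.List.pyRange 0 W 1).foldl (fun acc j => acc ++ [i * tw + j]) acc) []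
    = (List.range H.toNat).flatMap
      (fun (i : Nat) => (List.range W.toNat).map (fun (j : Nat) => ((i : Nat) : Int) * tw + ((j : Nat) : Int))) := by
  have houter :
      (fun (acc : List Int) (i : Int) =>
        (PySem.List.pyRange 0 W 1).foldl (fun acc j => acc ++ [i * tw + j]) acc)
      = (fun (acc : List Int) (i : Int) =>
          acc ++ (PySem.List.pyRange 0 W 1).map (fun j => i * tw + j)) := by
    funext acc i
    exact PySem.List.foldl_append_singleton_eq_map _ _ _
  rw [houter, PySem.List.foldl_append_eq_flatMap, List.nil_append,
    PySem.List.pyRange_zero, PySem.List.pyRange_zero, List.flatMap_map]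
  apply List.flatMap_congr
  intro i _
  rw [List.map_map]
  rfl

-- B's comprehension, over natural-number ranges
theorem pv_rhs_eq (H W tw : Int) :
    (PySem.List.pyRange 0 (max 0 H * max 0 W) 1).map
      (fun k => PySem.Int.floordiv k (max 0 W) * tw + PySem.Int.mod k (max 0 W))
    = (List.range (H.toNat * W.toNat)).map
      (fun (k : Nat) => ((k / W.toNat : Nat) : Int) * tw + ((k % W.toNat : Nat) : Int)) := by
  have hW : max 0 W = ((W.toNat : Nat) : Int) := by omega
  have hmul : max 0 H * max 0 W = (((H.toNat * W.toNat : Nat)) : Int) := by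
    have hH : max 0 H = ((H.toNat : Nat) : Int) := by omega
    rw [hH, hW]; push_cast; ring
  rw [hmul, hW, PySem.List.pyRange_zero_nat, List.map_map]
  apply List.map_congr_left
  intro k _
  show PySem.Int.floordiv (k : Int) ((W.toNat : Nat) : Int) * tw
      + PySem.Int.mod (k : Int) ((W.toNat : Nat) : Int) = _
  rw [PySem.Int.floordiv_natCast, PySem.Int.mod_natCast]

-- ===== VERDICT (by name: the statement is the Claim_ definition above) =====
theorem compute_bit_shifts_spec : Claim_equal_compute_bit_shifts := by
  intro p t _
  unfold Spec_compute_bit_shifts compute_bit_shifts compute_bit_shifts_alt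
  rw [pv_lhs_eq (t.1 - p.1 + 1) (t.2 - p.2 + 1) t.2,
    pv_rhs_eq (t.1 - p.1 + 1) (t.2 - p.2 + 1) t.2,
    pv_range_mul_divmod t.2 ((t.2 - p.2 + 1).toNat) ((t.1 - p.1 + 1).toNat)]
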